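-- pv_equiv track=rewrite | github.com/m00zu/Synapse-Plugins | rdkit_nodes/docking_nodes.py | _split_pdbqt_models
-- ===== SOURCE A (Python) =====
-- def _split_pdbqt_models(pdbqt_str):
--     """Split multi-model PDBQT into individual MODEL block strings."""
--     models = []
--     current = []
--     for line in pdbqt_str.splitlines():
--         if line.startswith('MODEL'):
--             current = [line]
--         elif line.startswith('ENDMDL'):
--             current.append(line)
--             models.append('\n'.join(current))
--             current = []
--         else:
--             current.append(line)
--     return models
-- ===== SOURCE B (Python) =====
-- def _split_pdbqt_models(pdbqt_str):
--     """Split multi-model PDBQT into individual MODEL block strings."""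
--     lines = pdbqt_str.splitlines()
--     models = []
--     start = 0
--     for i, line in enumerate(lines):
--         if line.startswith('MODEL'):
--             start = i
--         elif line.startswith('ENDMDL'):
--             models.append('\n'.join(lines[start:i + 1]))
--             start = i + 1
--     return models
-- ===== Notes on version B (the rewrite author's own statement) =====
-- stated objective: alternative
-- what changed: Replaces A's running-list accumulator (append per line, reset on MODEL/flush on ENDMDL) with a single split into lines and an integer block-start index: MODEL moves the start, ENDMDL joins lines[start:i+1] and advances past it; non-boundary lines need no work.
import Mathlib
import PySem

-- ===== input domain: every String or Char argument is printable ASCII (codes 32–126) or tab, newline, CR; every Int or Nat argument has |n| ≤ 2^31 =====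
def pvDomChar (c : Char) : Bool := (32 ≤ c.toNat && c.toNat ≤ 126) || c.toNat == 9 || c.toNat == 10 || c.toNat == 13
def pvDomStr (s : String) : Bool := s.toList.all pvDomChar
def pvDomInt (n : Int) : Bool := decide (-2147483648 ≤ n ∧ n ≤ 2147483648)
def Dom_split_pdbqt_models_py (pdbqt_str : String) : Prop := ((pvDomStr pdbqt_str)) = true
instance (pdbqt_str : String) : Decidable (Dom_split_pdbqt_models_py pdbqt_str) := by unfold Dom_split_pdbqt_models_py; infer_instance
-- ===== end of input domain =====

-- B replaces A's per-line list accumulator by an integer block-start index over the pre-split lines (alternative decomposition, same cost).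

-- ===== PORT A =====
def pvAStep (st : List String × List String) (line : String) : List String × List String :=
  if PySem.Str.startswith line "MODEL" then (st.1, [line])
  else if PySem.Str.startswith line "ENDMDL" then
    (st.1 ++ [PySem.Str.join "\n" (st.2 ++ [line])], [])
  else (st.1, st.2 ++ [line])

def split_pdbqt_models_py (pdbqt_str : String) : List String :=
  ((PySem.Str.splitlines pdbqt_str).foldl pvAStep ([], [])).1

-- ===== PORT B =====
def pvBStep (lines : List String) (st : List String × Int) (p : Int × String) : List String × Int :=
  if PySem.Str.startswith p.2 "MODEL" then (st.1, p.1)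
  else if PySem.Str.startswith p.2 "ENDMDL" then
    (st.1 ++ [PySem.Str.join "\n" (PySem.List.slice lines (some st.2) (some (p.1 + 1)))], p.1 + 1)
  else st

def split_pdbqt_models_py_alt (pdbqt_str : String) : List String :=
  let lines := PySem.Str.splitlines pdbqt_str
  ((PySem.List.enumerate lines 0).foldl (pvBStep lines) ([], 0)).1

-- ===== PRECONDITION & SPEC =====
def Spec_split_pdbqt_models_py (pdbqt_str : String) (out : List String) : Prop := out = split_pdbqt_models_py_alt pdbqt_str
instance (pdbqt_str : String) (out : List String) : Decidable (Spec_split_pdbqt_models_py pdbqt_str out) := by unfold Spec_split_pdbqt_models_py; infer_instance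

-- ===== CLAIM (what is proved, stated in full; the proofs are below) =====
def Claim_equal_split_pdbqt_models_py : Prop := ∀ (pdbqt_str : String), Dom_split_pdbqt_models_py pdbqt_str → Spec_split_pdbqt_models_py pdbqt_str (split_pdbqt_models_py pdbqt_str)

-- ===== LEMMAS AND PROOFS =====

-- Invariant: A's accumulator `cur` is exactly lines[s:k] where s is B's start index and k the current position.
theorem pv_key (lines : List String) : ∀ (rest : List String) (k s : Nat) (ms : List String),
    s ≤ k → lines.drop k = rest →
    (rest.foldl pvAStep (ms, (lines.drop s).take (k - s))).1
      = ((PySem.List.enumerate rest (k : Int)).foldl (pvBStep lines) (ms, (s : Int))).1 := by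
  intro rest
  induction rest with
  | nil => intro k s ms _ _; simp [PySem.List.enumerate]
  | cons x rest ih =>
    intro k s ms hsk hdrop
    have hk : lines[k]? = some x := by
      have : (lines.drop k)[0]? = some x := by rw [hdrop]; rfl
      simpa using this
    have hdrop' : lines.drop (k + 1) = rest := by
      have := congrArg List.tail hdrop
      simpa [List.tail_drop] using this
    -- extending the slice by one element
    have hext : ∀ t : Nat, t ≤ k →
        (lines.drop t).take (k - t) ++ [x] = (lines.drop t).take (k + 1 - t) := by
      intro t ht
      have h1 : k + 1 - t = (k - t) + 1 := by omega
      rw [h1, List.take_add_one]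
      have : (lines.drop t)[k - t]? = some x := by
        rw [List.getElem?_drop]
        have h2 : t + (k - t) = k := by omega
        rw [h2, hk]
      simp [this]
    have hcast : ((k : Int) + 1) = ((k + 1 : Nat) : Int) := by push_cast; ring
    rw [PySem.List.enumerate_cons]
    simp only [List.foldl_cons]
    by_cases hM : PySem.Str.startswith x "MODEL" = true
    · -- MODEL: A resets current to [x]; B sets start = k
      have hM' := hM; simp at hM'
      have ha : pvAStep (ms, (lines.drop s).take (k - s)) x = (ms, [x]) := by
        simp [pvAStep, hM']
      have hb : pvBStep lines (ms, (s : Int)) ((k : Int), x) = (ms, (k : Int)) := by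
        simp [pvBStep, hM']
      have h1 : (lines.drop k).take (k + 1 - k) = [x] := by
        rw [← hext k (le_refl k)]; simp
      rw [ha, hb, ← h1, hcast]
      exact ih (k + 1) k ms (by omega) hdrop'
    · have hM' : PySem.Str.startswith x "MODEL" = false := by
        simpa using hM
      simp at hM'
      by_cases hE : PySem.Str.startswith x "ENDMDL" = true
      · -- ENDMDL: A flushes; B joins the slice and advances start
        have hE' := hE; simp at hE'
        have ha : pvAStep (ms, (lines.drop s).take (k - s)) x
            = (ms ++ [PySem.Str.join "\n" ((lines.drop s).take (k - s) ++ [x])], []) := by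
          simp [pvAStep, hM', hE']
        have hb : pvBStep lines (ms, (s : Int)) ((k : Int), x)
            = (ms ++ [PySem.Str.join "\n" (PySem.List.slice lines (some (s : Int)) (some ((k : Int) + 1)))], (k : Int) + 1) := by
          simp [pvBStep, hM', hE']
        have hsl : PySem.List.slice lines (some (s : Int)) (some ((k : Int) + 1))
            = (lines.drop s).take (k - s) ++ [x] := by
          rw [hcast, PySem.List.slice_natCast, hext s hsk]
        have h0 : (lines.drop (k + 1)).take (k + 1 - (k + 1)) = ([] : List String) := by simp
        rw [ha, hb, hsl, hext s hsk, ← hext s hsk, ← h0, hcast]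
        exact ih (k + 1) (k + 1) _ (le_refl _) hdrop'
      · -- other line: A appends to current; B leaves start alone
        have hE' : PySem.Str.startswith x "ENDMDL" = false := by simpa using hE
        simp at hE'
        have ha : pvAStep (ms, (lines.drop s).take (k - s)) x
            = (ms, (lines.drop s).take (k - s) ++ [x]) := by
          simp [pvAStep, hM', hE']
        have hb : pvBStep lines (ms, (s : Int)) ((k : Int), x) = (ms, (s : Int)) := by
          simp [pvBStep, hM', hE']
        rw [ha, hb, hext s hsk, hcast]
        exact ih (k + 1) s ms (by omega) hdrop'

-- ===== VERDICT (by name: the statement is the Claim_ definition above) =====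
theorem split_pdbqt_models_py_spec : Claim_equal_split_pdbqt_models_py := by
  intro s _
  unfold Spec_split_pdbqt_models_py split_pdbqt_models_py split_pdbqt_models_py_alt
  have := pv_key (PySem.Str.splitlines s) (PySem.Str.splitlines s) 0 0 [] (le_refl 0) (by simp)
  simpa using this
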